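-- pv_equiv track=rewrite | github.com/upperdim/advent-of-code-2024 | day14/day14.py | is_xmas_tree
-- ===== SOURCE A (Python) =====
-- def check_robot_at(ps, x, y):
-- 	for i in range(len(ps)):
-- 		if ps[i][0] == x and ps[i][1] == y:
-- 			return True
-- 	return False
--
-- def is_xmas_tree(ps, w, h):
-- 	tree_height = 7
-- 	# Check entire grid
-- 	for y in range(h - tree_height):
-- 		for x in range(w):
-- 			# For each coordinate, check for a vertical line
-- 			is_tree = True
-- 			for y_offset in range(tree_height):
-- 				if check_robot_at(ps, x, y + y_offset) == False:
-- 					is_tree = False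
-- 					break
-- 			if is_tree:
-- 				return True
-- 			else:
-- 				continue
-- 	return False
-- ===== SOURCE B (Python) =====
-- def is_xmas_tree(ps, w, h):
--     # Scan robots as candidate line tops with a hash set, instead of scanning the whole grid.
--     pts = set(ps)
--     return any(
--         0 <= x < w and 0 <= y < h - 7
--         and all((x, y + k) in pts for k in range(1, 7))
--         for (x, y) in ps
--     )
-- ===== Notes on version B (the rewrite author's own statement) =====
-- stated objective: faster
-- what changed: Instead of scanning every grid cell and probing each of the 7 cells below it by a linear search of the robot list, B makes one pass over the robots, treating each robot as a candidate line top and checking the 6 cells below it in a precomputed hash set.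
import Mathlib
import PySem

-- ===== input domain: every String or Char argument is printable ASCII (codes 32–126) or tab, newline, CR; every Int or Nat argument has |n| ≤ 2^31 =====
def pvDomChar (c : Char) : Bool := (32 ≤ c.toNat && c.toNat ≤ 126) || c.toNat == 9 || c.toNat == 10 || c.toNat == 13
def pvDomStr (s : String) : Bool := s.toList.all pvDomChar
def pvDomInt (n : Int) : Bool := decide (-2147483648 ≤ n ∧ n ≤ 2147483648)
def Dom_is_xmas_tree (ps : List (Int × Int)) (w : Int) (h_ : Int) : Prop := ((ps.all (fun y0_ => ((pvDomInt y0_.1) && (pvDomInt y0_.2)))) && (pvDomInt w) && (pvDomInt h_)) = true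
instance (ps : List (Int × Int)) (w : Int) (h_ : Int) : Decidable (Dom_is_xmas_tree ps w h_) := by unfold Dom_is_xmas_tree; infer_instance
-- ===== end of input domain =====

-- B replaces A's whole-grid scan (each cell probed by a linear scan of ps) by a single pass
-- over the robots themselves, treating each robot as a candidate line top checked against a
-- hash set of all robots; objective: faster.

-- ===== PORT A =====
-- for i in range(len(ps)): if ps[i][0] == x and ps[i][1] == y: return True / return False
def check_robot_at (ps : List (Int × Int)) (x y : Int) : Bool :=
  (PySem.List.pyRange 0 (ps.length : Int) 1).any (fun i =>
    (PySem.List.pyGetD ps i ((0 : Int), (0 : Int))).1 == x &&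
    (PySem.List.pyGetD ps i ((0 : Int), (0 : Int))).2 == y)

def is_xmas_tree (ps : List (Int × Int)) (w : Int) (h_ : Int) : Bool :=
  let tree_height : Int := 7
  -- outer loops with early 'return True'; inner loop sets is_tree := False and breaks
  (PySem.List.pyRange 0 (h_ - tree_height) 1).any (fun y =>
    (PySem.List.pyRange 0 w 1).any (fun x =>
      (PySem.List.pyRange 0 tree_height 1).all (fun y_offset =>
        check_robot_at ps x (y + y_offset))))

-- ===== PORT B =====
def is_xmas_tree_alt (ps : List (Int × Int)) (w : Int) (h_ : Int) : Bool :=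
  let pts : PySem.Set (Int × Int) := PySem.Set.ofList ps
  ps.any (fun p =>
    decide (0 ≤ p.1) && decide (p.1 < w) && decide (0 ≤ p.2) && decide (p.2 < h_ - 7) &&
    (PySem.List.pyRange 1 7 1).all (fun k => PySem.Set.contains pts (p.1, p.2 + k)))

-- ===== PRECONDITION & SPEC =====
def Spec_is_xmas_tree (ps : List (Int × Int)) (w : Int) (h_ : Int) (out : Bool) : Prop := out = is_xmas_tree_alt ps w h_
instance (ps : List (Int × Int)) (w : Int) (h_ : Int) (out : Bool) : Decidable (Spec_is_xmas_tree ps w h_ out) := by unfold Spec_is_xmas_tree; infer_instance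

-- ===== CLAIM (what is proved, stated in full; the proofs are below) =====
def Claim_equal_is_xmas_tree : Prop := ∀ (ps : List (Int × Int)) (w : Int) (h_ : Int), Dom_is_xmas_tree ps w h_ → Spec_is_xmas_tree ps w h_ (is_xmas_tree ps w h_)

-- ===== LEMMAS AND PROOFS =====

lemma check_robot_at_iff (ps : List (Int × Int)) (x y : Int) :
    check_robot_at ps x y = true ↔ (x, y) ∈ ps := by
  unfold check_robot_at
  have h := PySem.List.map_pyGetD_pyRange_zero' (xs := ps) (d := ((0 : Int), (0 : Int)))
  have h2 : (PySem.List.pyRange 0 (ps.length : Int) 1).any (fun i =>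
      (PySem.List.pyGetD ps i ((0 : Int), (0 : Int))).1 == x &&
      (PySem.List.pyGetD ps i ((0 : Int), (0 : Int))).2 == y)
      = ps.any (fun q => q.1 == x && q.2 == y) := by
    conv_rhs => rw [← h]
    rw [List.any_map]
    rfl
  rw [h2]
  simp only [List.any_eq_true, Bool.and_eq_true, beq_iff_eq]
  constructor
  · rintro ⟨⟨a, b⟩, hm, rfl, rfl⟩; exact hm
  · intro hm; exact ⟨(x, y), hm, rfl, rfl⟩

lemma is_xmas_tree_iff (ps : List (Int × Int)) (w h_ : Int) :
    is_xmas_tree ps w h_ = true ↔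
    ∃ y x, (0 ≤ y ∧ y < h_ - 7) ∧ (0 ≤ x ∧ x < w) ∧
      ∀ k, 0 ≤ k → k < 7 → (x, y + k) ∈ ps := by
  unfold is_xmas_tree
  simp only [List.any_eq_true, List.all_eq_true, PySem.List.mem_pyRange_one,
    check_robot_at_iff]
  constructor
  · rintro ⟨y, hy, x, hx, hall⟩
    exact ⟨y, x, hy, hx, fun k hk0 hk7 => hall k ⟨hk0, hk7⟩⟩
  · rintro ⟨y, x, hy, hx, hall⟩
    exact ⟨y, hy, x, hx, fun k hk => hall k hk.1 hk.2⟩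

lemma is_xmas_tree_alt_iff (ps : List (Int × Int)) (w h_ : Int) :
    is_xmas_tree_alt ps w h_ = true ↔
    ∃ p ∈ ps, (0 ≤ p.1 ∧ p.1 < w) ∧ (0 ≤ p.2 ∧ p.2 < h_ - 7) ∧
      ∀ k, 1 ≤ k → k < 7 → (p.1, p.2 + k) ∈ ps := by
  unfold is_xmas_tree_alt
  simp only [List.any_eq_true, List.all_eq_true, Bool.and_eq_true, decide_eq_true_eq,
    PySem.List.mem_pyRange_one, PySem.Set.contains_iff, PySem.Set.mem_ofList]
  constructor
  · rintro ⟨p, hm, ⟨⟨⟨h1, h2⟩, h3⟩, h4⟩, hall⟩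
    exact ⟨p, hm, ⟨h1, h2⟩, ⟨h3, h4⟩, fun k hk1 hk7 => hall k ⟨hk1, hk7⟩⟩
  · rintro ⟨p, hm, ⟨h1, h2⟩, ⟨h3, h4⟩, hall⟩
    exact ⟨p, hm, ⟨⟨⟨h1, h2⟩, h3⟩, h4⟩, fun k hk => hall k hk.1 hk.2⟩

-- ===== VERDICT (by name: the statement is the Claim_ definition above) =====
theorem is_xmas_tree_spec : Claim_equal_is_xmas_tree := by
  intro ps w h_ _
  unfold Spec_is_xmas_tree
  rw [Bool.eq_iff_iff, is_xmas_tree_iff, is_xmas_tree_alt_iff]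
  constructor
  · rintro ⟨y, x, hy, hx, hall⟩
    refine ⟨(x, y), ?_, hx, hy, fun k hk1 hk7 => hall k (by omega) hk7⟩
    have := hall 0 le_rfl (by norm_num)
    simpa using this
  · rintro ⟨⟨x, y⟩, hm, hx, hy, hall⟩
    refine ⟨y, x, hy, hx, fun k hk0 hk7 => ?_⟩
    rcases eq_or_lt_of_le hk0 with h | h
    · simpa [← h] using hm
    · exact hall k (by omega) hk7
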